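-- pv_equiv track=rewrite | github.com/nickyiliwang/ds_algo | Misc/cake.py | solution
-- ===== SOURCE A (Python) =====
-- def solution(s):
--     def countOccurrence(s, pattern):
--         count = 0
--         left, right = 0, len(pattern)
--         while right <= len(s):
--             if s[left:right] == pattern:
--                 count += 1
--                 left = right
--                 right += len(pattern)
--             else:
--                 right += 1
--
--         return count
--
--     for i in range(1, len(s) + 1):
--         substr = s[:i]
--
--         count = countOccurrence(s, substr)
--
--         if count * i == len(s):
--             return count
-- ===== SOURCE B (Python) =====
-- def solution(s):
--     n = len(s)
--     for d in range(1, n + 1):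
--         if n % d == 0 and s[:d] * (n // d) == s:
--             return n // d
-- ===== Notes on version B (the rewrite author's own statement) =====
-- stated objective: faster
-- what changed: B tests only the divisors of len(s) and checks each candidate prefix by a single replicate-and-compare (s[:d]*(n//d)==s) instead of A's hand-written greedy occurrence-counting scan over every prefix length.
-- outside the precondition, e.g. on solution(''): A returns None, B returns None
import Mathlib
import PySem

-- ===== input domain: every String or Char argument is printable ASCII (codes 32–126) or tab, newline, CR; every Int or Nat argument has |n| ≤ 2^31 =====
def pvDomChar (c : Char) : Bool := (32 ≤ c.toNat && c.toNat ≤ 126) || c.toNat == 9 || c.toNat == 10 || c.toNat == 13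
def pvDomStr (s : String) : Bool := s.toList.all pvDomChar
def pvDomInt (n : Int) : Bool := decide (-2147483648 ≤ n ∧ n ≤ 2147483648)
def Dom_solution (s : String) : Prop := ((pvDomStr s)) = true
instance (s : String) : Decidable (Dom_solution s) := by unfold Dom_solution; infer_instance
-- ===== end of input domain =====

-- B replaces A's per-prefix greedy occurrence-counting scan by testing only the divisors d of
-- len(s) with a single replicate-and-compare s[:d]*(n//d)==s (objective: faster).

-- ===== PORT A =====
-- while-loop of countOccurrence; `hp` carries `pattern ≠ []`, true at every call site
-- (pattern = s[:i] with 1 ≤ i ≤ len s), needed only for termination.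
def countOccLoop (s pat : List Char) (hp : pat ≠ []) (left right count : Nat) : Nat :=
  if h : right ≤ s.length then
    if PySem.List.slice s (some (left : Int)) (some (right : Int)) = pat then
      countOccLoop s pat hp right (right + pat.length) (count + 1)
    else
      countOccLoop s pat hp left (right + 1) count
  else count
termination_by s.length + 1 - right
decreasing_by
  · have := List.length_pos_iff.mpr hp; omega
  · omega

-- `pattern = s[:i]` is nonempty at every call site of the while-loop
theorem takeNeNil (s : List Char) (i : Nat) (h1 : 1 ≤ i) (h : i ≤ s.length) : s.take i ≠ [] := by
  intro hc
  rcases List.take_eq_nil_iff.mp hc with h0 | h0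
  · exact absurd h0 (by omega)
  · rw [h0] at h; simp at h; omega

-- the for-loop `for i in range(1, len(s)+1)`; returns none when it falls through (s = "").
def solLoopA (s : List Char) (i : Nat) (h1 : 1 ≤ i) : Option Nat :=
  if h : i ≤ s.length then
    let count := countOccLoop s (s.take i) (takeNeNil s i h1 h) 0 (s.take i).length 0
    if count * i = s.length then some count
    else solLoopA s (i + 1) (by omega)
  else none
termination_by s.length + 1 - i

def solution (s : String) : Int :=
  match solLoopA s.toList 1 (le_refl 1) with
  | some c => (c : Int)
  | none => 0   -- unreachable under Pre_solution: Python A returns None only for s = ""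

-- ===== PORT B =====
def solLoopB (s : List Char) (d : Nat) : Option Nat :=
  if h : d ≤ s.length then
    if s.length % d = 0 ∧ PySem.List.pyRepeat (s.take d) ((s.length / d : Nat) : Int) = s then
      some (s.length / d)
    else solLoopB s (d + 1)
  else none
termination_by s.length + 1 - d

def solution_alt (s : String) : Int :=
  match solLoopB s.toList 1 with
  | some c => (c : Int)
  | none => 0   -- unreachable under Pre_solution: only for s = ""

-- ===== PRECONDITION & SPEC =====
-- Pre_ excludes only s = "", where Python A falls through its loop and returns None (not an int).
def Pre_solution (s : String) : Prop := s ≠ ""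
instance (s : String) : Decidable (Pre_solution s) := by unfold Pre_solution; infer_instance
def pvWitness_solution : String := "abab"

def Spec_solution (s : String) (out : Int) : Prop := out = solution_alt s
instance (s : String) (out : Int) : Decidable (Spec_solution s out) := by unfold Spec_solution; infer_instance

-- ===== CLAIM (what is proved, stated in full; the proofs are below) =====
def Claim_equal_solution : Prop := ∀ (s : String), Dom_solution s → Pre_solution s → Spec_solution s (solution s)

-- ===== LEMMAS AND PROOFS =====

-- number of consecutive copies of `pat` found greedily from position l (A's count, aligned)
def gblocks (s pat : List Char) (hp : pat ≠ []) (l : Nat) : Nat :=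
  if h : l + pat.length ≤ s.length ∧ (s.drop l).take pat.length = pat then
    gblocks s pat hp (l + pat.length) + 1
  else 0
termination_by s.length + 1 - l
decreasing_by
  have := List.length_pos_iff.mpr hp; omega

-- once the window is longer than pat, countOccLoop can never match again
theorem countOccLoop_drift (s pat : List Char) (hp : pat ≠ []) :
    ∀ fuel right left count, s.length + 1 - right ≤ fuel →
      pat.length + left < right → countOccLoop s pat hp left right count = count := by
  intro fuel
  induction fuel with
  | zero =>
    intro right left count hf hlt
    rw [countOccLoop]
    have : ¬ right ≤ s.length := by omega
    simp [this]
  | succ f ih =>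
    intro right left count hf hlt
    rw [countOccLoop]
    by_cases hr : right ≤ s.length
    · have hsl : PySem.List.slice s (some (left : Int)) (some (right : Int))
          = (s.drop left).take (right - left) := PySem.List.slice_natCast ..
      have hlen : ((s.drop left).take (right - left)).length = right - left := by
        simp; omega
      have hne : PySem.List.slice s (some (left : Int)) (some (right : Int)) ≠ pat := by
        intro he
        have := congrArg List.length he
        rw [hsl] at he
        have : pat.length = right - left := by
          rw [← he, hlen]
        omega
      simp [hr, hne]
      exact ih (right + 1) left count (by omega) (by omega)
    · simp [hr]

theorem countOccLoop_aligned (s pat : List Char) (hp : pat ≠ []) :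
    ∀ fuel l count, s.length + 1 - l ≤ fuel →
      countOccLoop s pat hp l (l + pat.length) count = count + gblocks s pat hp l := by
  intro fuel
  have hm : 0 < pat.length := List.length_pos_iff.mpr hp
  induction fuel with
  | zero =>
    intro l count hf
    rw [countOccLoop, gblocks]
    have h1 : ¬ l + pat.length ≤ s.length := by omega
    simp [h1]
  | succ f ih =>
    intro l count hf
    rw [countOccLoop, gblocks]
    by_cases h1 : l + pat.length ≤ s.length
    · have hsl : PySem.List.slice s (some (l : Int)) (some ((l : Int) + (pat.length : Int)))
          = (s.drop l).take pat.length := PySem.List.slice_natCast_add ..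
      by_cases hc : (s.drop l).take pat.length = pat
      · simp [h1, hsl, hc]
        rw [ih (l + pat.length) (count + 1) (by omega)]
        omega
      · simp [h1, hsl, hc]
        exact countOccLoop_drift s pat hp (s.length + 1) (l + pat.length + 1) l count
          (by omega) (by omega)
    · simp [h1]

theorem len_flat_rep (k : Nat) (pat : List Char) :
    (List.replicate k pat).flatten.length = k * pat.length := by
  induction k with
  | zero => simp
  | succ n ih =>
    rw [List.replicate_succ, List.flatten_cons]
    simp [ih, Nat.succ_mul]
    omega

theorem gblocks_prefix (s pat : List Char) (hp : pat ≠ []) :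
    ∀ fuel l, s.length + 1 - l ≤ fuel →
      (List.replicate (gblocks s pat hp l) pat).flatten <+: s.drop l := by
  intro fuel
  have hm : 0 < pat.length := List.length_pos_iff.mpr hp
  induction fuel with
  | zero =>
    intro l hf
    rw [gblocks, dif_neg (fun hc => absurd hc.1 (by omega))]
    simp
  | succ f ih =>
    intro l hf
    rw [gblocks]
    by_cases hc : l + pat.length ≤ s.length ∧ (s.drop l).take pat.length = pat
    · rw [dif_pos hc]
      obtain ⟨h1, h2⟩ := hc
      have hdd : s.drop (l + pat.length) = (s.drop l).drop pat.length := by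
        rw [List.drop_drop]
      obtain ⟨t, ht⟩ := ih (l + pat.length) (by omega)
      refine ⟨t, ?_⟩
      have hsplit : s.drop l = pat ++ s.drop (l + pat.length) := by
        conv_lhs => rw [← List.take_append_drop pat.length (s.drop l)]
        rw [h2, hdd]
      rw [List.replicate_succ, List.flatten_cons, hsplit, ← ht, List.append_assoc]
    · rw [dif_neg hc]; simp

theorem gblocks_exact (s pat : List Char) (hp : pat ≠ []) :
    ∀ k l, s.drop l = (List.replicate k pat).flatten → gblocks s pat hp l = k := by
  have hm : 0 < pat.length := List.length_pos_iff.mpr hp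
  intro k
  induction k with
  | zero =>
    intro l hd
    rw [gblocks, dif_neg]
    intro hc
    have hlen : (s.drop l).length = 0 := by rw [hd]; simp
    simp at hlen
    omega
  | succ k ih =>
    intro l hd
    have hdl : s.drop l = pat ++ (List.replicate k pat).flatten := by
      rw [hd, List.replicate_succ, List.flatten_cons]
    have hlen2 : s.length - l = pat.length + k * pat.length := by
      have h := congrArg List.length hdl
      simp at h
      omega
    have h1 : l + pat.length ≤ s.length := by
      have : (s.drop l).length = s.length - l := by simp
      omega
    have h2 : (s.drop l).take pat.length = pat := by rw [hdl]; simp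
    rw [gblocks, dif_pos ⟨h1, h2⟩]
    have hnext : s.drop (l + pat.length) = (List.replicate k pat).flatten := by
      have hdd : s.drop (l + pat.length) = (s.drop l).drop pat.length := by
        rw [List.drop_drop]
      rw [hdd, hdl]; simp
    rw [ih _ hnext]

-- the success tests of the two loops agree, and so do the returned values
theorem cond_iff (s : List Char) (i : Nat) (h1 : 1 ≤ i) (h : i ≤ s.length)
    (hp : s.take i ≠ []) :
    (countOccLoop s (s.take i) hp 0 (s.take i).length 0 * i = s.length ↔
      (s.length % i = 0 ∧
        PySem.List.pyRepeat (s.take i) ((s.length / i : Nat) : Int) = s)) ∧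
    (countOccLoop s (s.take i) hp 0 (s.take i).length 0 * i = s.length →
      countOccLoop s (s.take i) hp 0 (s.take i).length 0 = s.length / i) := by
  have hlen : (s.take i).length = i := by simp; omega
  have hg : countOccLoop s (s.take i) hp 0 (s.take i).length 0 = gblocks s (s.take i) hp 0 := by
    have := countOccLoop_aligned s (s.take i) hp (s.length + 1) 0 0 (by omega)
    simpa using this
  rw [hg]
  have hrep : ∀ k : Nat, PySem.List.pyRepeat (s.take i) ((k : Nat) : Int)
      = (List.replicate k (s.take i)).flatten := by
    intro k
    simp [PySem.List.pyRepeat]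
  constructor
  · constructor
    · intro hcm
      have hpre : (List.replicate (gblocks s (s.take i) hp 0) (s.take i)).flatten <+: s := by
        have := gblocks_prefix s (s.take i) hp (s.length + 1) 0 (by omega)
        simpa using this
      have heq : (List.replicate (gblocks s (s.take i) hp 0) (s.take i)).flatten = s := by
        apply hpre.eq_of_length
        rw [len_flat_rep, hlen, hcm]
      refine ⟨?_, ?_⟩
      · rw [← hcm]; exact Nat.mul_mod_left _ _
      · rw [hrep, ← hcm, Nat.mul_div_cancel _ (by omega), heq]
    · rintro ⟨hmod, hrepeq⟩
      rw [hrep] at hrepeq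
      have := gblocks_exact s (s.take i) hp (s.length / i) 0 (by simpa using hrepeq.symm)
      rw [this, Nat.div_mul_cancel (Nat.dvd_of_mod_eq_zero hmod)]
  · intro hcm
    rw [← hcm, Nat.mul_div_cancel _ (by omega)]

theorem loops_eq (s : List Char) :
    ∀ fuel i h1, s.length + 1 - i ≤ fuel → solLoopA s i h1 = solLoopB s i := by
  intro fuel
  induction fuel with
  | zero =>
    intro i h1 hf
    rw [solLoopA, solLoopB]
    have hni : ¬ i ≤ s.length := by omega
    simp [hni]
  | succ f ih =>
    intro i h1 hf
    rw [solLoopA, solLoopB]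
    by_cases h : i ≤ s.length
    · rw [dif_pos h, dif_pos h]
      obtain ⟨hiff, hval⟩ := cond_iff s i h1 h (takeNeNil s i h1 h)
      by_cases hA : countOccLoop s (s.take i) (takeNeNil s i h1 h) 0 (s.take i).length 0 * i = s.length
      · rw [if_pos hA, if_pos (hiff.mp hA), hval hA]
      · rw [if_neg hA, if_neg (fun hB => hA (hiff.mpr hB))]
        exact ih (i + 1) (by omega) (by omega)
    · rw [dif_neg h, dif_neg h]

-- ===== VERDICT (by name: the statement is the Claim_ definition above) =====
theorem solution_spec : Claim_equal_solution := by
  intro s _ _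
  unfold Spec_solution solution solution_alt
  rw [loops_eq s.toList (s.toList.length + 1) 1 (le_refl 1) (by omega)]
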